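-- pv_equiv track=rewrite | github.com/Lif-a-nova/-Performance-Lab | task1/task1.py | way_array
-- ===== SOURCE A (Python) =====
-- from typing import List
--
-- class ListNode:
--     """Класс для создания кругового массива """
--     def __init__(self, max_n: int):
--         self.max_n: int = max_n
--         self.queue: list = [None] * self.max_n
--         self.head = 0
--         self.tail = 0
--         self.size = 0
--
--     def is_empty(self):
--         """Функция проверки массива на пустоту """
--         return self.size == 0
--
--     def push(self, value: int):
--         """Функция добавления элемента в массив """
--         if self.size < self.max_n:
--             if self.queue[self.tail] is not None:
--                 self.head += 1
--                 if self.head == self.max_n: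
--                     self.head = 0
--             self.queue[self.tail] = value
--             self.tail += 1
--             if self.tail == self.max_n:
--                 self.tail -= 1
--             self.size += 1
--
--     def shift(self, steps: int):
--         """Функция смещения элементов массива """
--         for i in range(steps):
--             self.queue.append(self.queue.pop(0))
--
-- def way_array(n: int, m: int) -> List[int]:
--     """Функция поиска пути по круговому массиву """
--     array = ListNode(n)
--     for i in range(1, n + 1):
--         array.push(i)
--     collector = []
--     stop_arr = array.queue[0]
--     while stop_arr:
--         arr = array.queue[:m]
--         collector.append(arr)
--         if stop_arr == arr[-1]:
--             break
--         array.shift(m - 1)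
--     result = [ x[0] for x in collector]
--     return result
-- ===== SOURCE B (Python) =====
-- def way_array(n, m):
--     """Closed-form walk: the front after k rotations is 1 + (k*(m-1) mod n);
--     collect until the m-th visible element is 1 (at most n collections)."""
--     step = (m - 1) % n
--     last = (min(m, n) - 1) % n
--     result = []
--     pos = 0
--     for _ in range(n):
--         result.append(pos + 1)
--         if (pos + last) % n == 0:
--             break
--         pos = (pos + step) % n
--     return result
-- ===== Notes on version B (the rewrite author's own statement) =====
-- stated objective: faster
-- what changed: B drops A's circular-buffer class entirely: instead of building an n-element list and rotating it one element at a time (list.pop(0)/append, m-1 times per collected value) and slicing queue[:m] each round, B tracks only the front position by modular arithmetic (front after k rotations is 1+(k*(m-1) mod n)) and appends it directly until the stopping residue is hit. Pre_ excludes n <= 0 and m <= 0 (A raises IndexError on an empty queue or empty slice, or never terminates; …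
-- outside the precondition, e.g. on way_array(5, 0): A raises IndexError, B returns [1, 5, 4, 3, 2]; on way_array(2, 3): A does not finish within the time limit, B returns [1, 1]; on way_array(5, -4): A returns [1], B returns [1]
import Mathlib
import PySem

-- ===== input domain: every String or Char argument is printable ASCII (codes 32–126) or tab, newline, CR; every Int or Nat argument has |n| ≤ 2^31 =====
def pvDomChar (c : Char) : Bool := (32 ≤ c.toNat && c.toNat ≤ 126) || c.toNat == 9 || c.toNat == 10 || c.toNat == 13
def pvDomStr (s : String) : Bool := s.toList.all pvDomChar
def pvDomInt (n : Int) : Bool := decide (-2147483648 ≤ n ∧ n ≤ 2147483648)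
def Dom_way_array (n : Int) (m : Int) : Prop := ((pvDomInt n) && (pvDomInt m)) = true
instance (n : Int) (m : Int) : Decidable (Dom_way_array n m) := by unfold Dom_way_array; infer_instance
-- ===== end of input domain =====

-- B replaces A's circular-buffer simulation (building, slicing and repeatedly rotating a
-- list one element at a time) by direct modular arithmetic on the front position: faster.

-- ===== PORT A =====
-- Python's heterogeneous list [None]*n later filled with ints is List (Option Int).
structure PvListNode where
  max_n : Int
  queue : List (Option Int)
  head : Int
  tail : Int
  size : Int

def pvLNinit (max_n : Int) : PvListNode :=
  { max_n := max_n, queue := List.replicate max_n.toNat none, head := 0, tail := 0, size := 0 }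

def pvLNpush (l : PvListNode) (value : Int) : PvListNode :=
  if l.size < l.max_n then
    -- self.queue[self.tail] read; in every state push reaches, tail is in range (default unused)
    let l :=
      if PySem.List.pyGetD l.queue l.tail none ≠ none then
        let h := l.head + 1
        { l with head := if h == l.max_n then 0 else h }
      else l
    let queue := PySem.List.pySetD l.queue l.tail (some value)
    let tail := l.tail + 1
    let tail := if tail == l.max_n then tail - 1 else tail
    { l with queue := queue, tail := tail, size := l.size + 1 }
  else l

def pvLNshift (l : PvListNode) (steps : Int) : PvListNode :=
  (PySem.List.pyRange 0 steps 1).foldl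
    (fun l _ =>
      -- self.queue.append(self.queue.pop(0)); pop(0) raises on [], unreachable here (queue has n ≥ 1 elements)
      match l.queue with
      | [] => l
      | q :: qs => { l with queue := qs ++ [q] }) l

-- the while loop; fuel n.toNat suffices: on every input Pre_ admits, A's loop exits within n iterations
def pvWhile (stop : Option Int) (m : Int) (fuel : Nat) (l : PvListNode)
    (collector : List (List (Option Int))) : List (List (Option Int)) :=
  match fuel with
  | 0 => collector
  | f + 1 =>
    if stop = none ∨ stop = some 0 then collector   -- while stop_arr: (None and 0 are falsy)
    else
      let arr := PySem.List.slice l.queue none (some m)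
      let collector := collector ++ [arr]
      -- arr[-1]; IndexError on empty arr is excluded by Pre_ (default unused there)
      if stop = (PySem.List.pyGet? arr (-1)).getD none then collector
      else pvWhile stop m f (pvLNshift l (m - 1)) collector

def way_array (n : Int) (m : Int) : List Int :=
  let array := (PySem.List.pyRange 1 (n + 1) 1).foldl pvLNpush (pvLNinit n)
  let stop := PySem.List.pyGetD array.queue 0 none   -- array.queue[0]; IndexError for n ≤ 0, excluded by Pre_
  let collector := pvWhile stop m n.toNat array []
  -- [x[0] for x in collector]; each x is a nonempty slice of the filled queue, so x[0] is an int
  collector.map (fun x => (PySem.List.pyGetD x 0 none).getD 0)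

-- ===== PORT B =====
def pvAltGo (fuel : Nat) (n last step pos : Int) (result : List Int) : List Int :=
  match fuel with
  | 0 => result
  | f + 1 =>
    let result := result ++ [pos + 1]
    if PySem.Int.mod (pos + last) n = 0 then result
    else pvAltGo f n last step (PySem.Int.mod (pos + step) n) result

def way_array_alt (n : Int) (m : Int) : List Int :=
  let step := PySem.Int.mod (m - 1) n
  let last := PySem.Int.mod (min m n - 1) n
  pvAltGo n.toNat n last step 0 []

-- ===== PRECONDITION & SPEC =====
-- Pre_ excludes n ≤ 0 and m ≤ 0 (A raises IndexError on an empty queue or empty slice, or never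
-- terminates; the lone returning corner m = 1-n rests on negative-slice accidents) and the inputs
-- with m > n on which gcd(m-1,n) does not divide n-1: there A's while loop never terminates.
def Pre_way_array (n : Int) (m : Int) : Prop :=
  1 ≤ n ∧ 1 ≤ m ∧ (m ≤ n ∨ ((n - 1) % ((Int.gcd (m - 1) n : Nat) : Int) = 0))
instance (n : Int) (m : Int) : Decidable (Pre_way_array n m) := by unfold Pre_way_array; infer_instance
def pvWitness_way_array : Int × Int := (5, 3)

def Spec_way_array (n : Int) (m : Int) (out : List Int) : Prop := out = way_array_alt n m
instance (n : Int) (m : Int) (out : List Int) : Decidable (Spec_way_array n m out) := by unfold Spec_way_array; infer_instance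

-- ===== CLAIM (what is proved, stated in full; the proofs are below) =====
def Claim_equal_way_array : Prop := ∀ (n : Int) (m : Int), Dom_way_array n m → Pre_way_array n m → Spec_way_array n m (way_array n m)

-- ===== LEMMAS AND PROOFS =====

-- the fully initialised queue: [some 1, …, some n]
def pvQueue0 (n : Nat) : List (Option Int) := (List.range n).map (fun (i : Nat) => some ((i : Int) + 1))

theorem pvQueue0_length (n : Nat) : (pvQueue0 n).length = n := by
  simp [pvQueue0]

theorem pvQueue0_getElem (n i : Nat) (h : i < (pvQueue0 n).length) :
    (pvQueue0 n)[i] = some ((i : Int) + 1) := by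
  unfold pvQueue0
  rw [List.getElem_map, List.getElem_range]

-- after pushing 1..k (k ≤ n): queue = [some 1..some k] ++ nones, tail = k (capped), size = k
theorem pvInit_foldl (n : Nat) (hn : 1 ≤ n) (k : Nat) (hk : k ≤ n) :
    (PySem.List.pyRange 1 ((k : Int) + 1) 1).foldl pvLNpush (pvLNinit (n : Int)) =
      { max_n := (n : Int),
        queue := (List.range k).map (fun (i : Nat) => some ((i : Int) + 1)) ++ List.replicate (n - k) none,
        head := 0,
        tail := if k = n then (n : Int) - 1 else (k : Int),
        size := (k : Int) } := by
  induction k with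
  | zero =>
    rw [show ((0 : Nat) : Int) + 1 = 1 from by norm_num, PySem.List.pyRange_one_eq_nil le_rfl]
    simp only [List.foldl_nil, pvLNinit]
    have : ¬ (0 = n) := by omega
    simp [this]
  | succ k ih =>
    have hk' : k ≤ n := by omega
    have hkn : k < n := by omega
    rw [show ((k + 1 : Nat) : Int) + 1 = ((k : Int) + 1) + 1 from by push_cast; ring,
        PySem.List.pyRange_one_succ_right (by omega), List.foldl_append, ih hk', List.foldl_cons,
        List.foldl_nil]
    have hnotn : ¬ (k = n) := by omega
    simp only [hnotn, if_false]
    unfold pvLNpush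
    have hsz : ((k : Int) < (n : Int)) := by exact_mod_cast hkn
    rw [if_pos hsz]
    have hlen : ((List.range k).map (fun (i : Nat) => some ((i : Int) + 1)) ++ List.replicate (n - k) none).length = n := by
      simp; omega
    have hget : PySem.List.pyGetD
        ((List.range k).map (fun (i : Nat) => some ((i : Int) + 1)) ++ List.replicate (n - k) none)
        ((k : Int)) (none : Option Int) = none := by
      rw [PySem.List.pyGetD_natCast, List.getD_eq_getElem?_getD,
          List.getElem?_append_right (by simp), List.getElem?_replicate]
      simp only [List.length_map, List.length_range]
      rw [if_pos (by omega)]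
      rfl
    simp only [hget, ne_eq, not_true_eq_false, if_false]
    have hset : PySem.List.pySetD
        ((List.range k).map (fun (i : Nat) => some ((i : Int) + 1)) ++ List.replicate (n - k) none)
        ((k : Int)) (some ((k : Int) + 1))
        = (List.range (k + 1)).map (fun (i : Nat) => some ((i : Int) + 1)) ++ List.replicate (n - (k + 1)) none := by
      rw [PySem.List.pySetD_natCast]
      have hrep : List.replicate (n - k) (none : Option Int)
          = none :: List.replicate (n - (k + 1)) none := by
        rw [← List.replicate_succ]
        congr 1
        omega
      rw [hrep, List.set_append_right k _ (by simp)]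
      simp [List.range_succ]
    rw [hset]
    congr 1
    by_cases h : k + 1 = n
    · have hb : ((k : Int) + 1 == (n : Int)) = true := by
        rw [beq_iff_eq]; exact_mod_cast h
      rw [if_pos hb, if_pos h]
      omega
    · have hb : ((k : Int) + 1 == (n : Int)) = false := by
        rw [beq_eq_false_iff_ne]
        intro hc; exact h (by exact_mod_cast hc)
      rw [if_neg (by simp [hb]), if_neg h]
      push_cast
      ring

theorem pvInit_eq (n : Nat) (hn : 1 ≤ n) :
    (PySem.List.pyRange 1 ((n : Int) + 1) 1).foldl pvLNpush (pvLNinit (n : Int)) =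
      { max_n := (n : Int), queue := pvQueue0 n, head := 0, tail := (n : Int) - 1, size := (n : Int) } := by
  have := pvInit_foldl n hn n le_rfl
  simpa [pvQueue0] using this

-- iterating Python's pop(0)/append is List.rotate
theorem pvRotFoldl (ticks : List Int) : ∀ (l : PvListNode), l.queue ≠ [] →
    ((ticks.foldl (fun l _ =>
        match l.queue with
        | [] => l
        | q :: qs => { l with queue := qs ++ [q] }) l).queue
      = l.queue.rotate ticks.length) := by
  induction ticks with
  | nil => intro l _; simp
  | cons t ts ih =>
    intro l hne
    obtain ⟨mx, q, hd, tl, sz⟩ := l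
    match q with
    | [] => exact absurd rfl hne
    | x :: xs =>
      simp only [List.foldl_cons]
      have := ih { max_n := mx, queue := xs ++ [x], head := hd, tail := tl, size := sz } (by simp)
      simp only [List.length_cons] at this ⊢
      rw [this, List.rotate_cons_succ]

-- one shift call rotates the queue left by s (s ≥ 0 in every call A makes)
theorem pvShift_queue (l : PvListNode) (s : Int) (hne : l.queue ≠ []) :
    (pvLNshift l s).queue = l.queue.rotate s.toNat := by
  unfold pvLNshift
  rw [pvRotFoldl _ l hne, PySem.List.length_pyRange_one]
  norm_num

-- the two loops run in lockstep
theorem pvLoop_lockstep (n : Nat) (hn : 1 ≤ n) (m : Int) (hm : 1 ≤ m)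
    (f : Nat) (pos : Nat) (hpos : pos < n) (l : PvListNode) (hq : l.queue = (pvQueue0 n).rotate pos)
    (acc : List (List (Option Int))) :
    (pvWhile (some 1) m f l acc).map (fun x => (PySem.List.pyGetD x 0 none).getD 0) =
      pvAltGo f (n : Int) (PySem.Int.mod (min m (n : Int) - 1) (n : Int))
        (PySem.Int.mod (m - 1) (n : Int)) ((pos : Int))
        (acc.map (fun x => (PySem.List.pyGetD x 0 none).getD 0)) := by
  induction f generalizing pos l acc with
  | zero => simp [pvWhile, pvAltGo]
  | succ f ih =>
    have hn0 : (0 : Int) < (n : Int) := by exact_mod_cast hn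
    have hlenq : l.queue.length = n := by rw [hq, List.length_rotate, pvQueue0_length]
    have hqne : l.queue ≠ [] := by
      intro h0; rw [h0] at hlenq; simp at hlenq; omega
    -- the elements of the rotated queue
    have hidxR : ∀ i, (hi : i < n) → ((pvQueue0 n).rotate pos)[i]'(by rw [List.length_rotate, pvQueue0_length]; exact hi)
        = some ((((i + pos) % n : Nat) : Int) + 1) := by
      intro i hi
      rw [List.getElem_rotate]
      simp only [pvQueue0_length]
      rw [pvQueue0_getElem]
    -- arr = queue[:m]
    have harr : PySem.List.slice l.queue none (some m) = l.queue.take m.toNat :=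
      PySem.List.slice_to _ (by omega)
    have hmt : 1 ≤ m.toNat := by omega
    have harrlen : (l.queue.take m.toNat).length = min m.toNat n := by
      simp [hlenq]
    have hlen1 : 1 ≤ min m.toNat n := by omega
    have harrne : l.queue.take m.toNat ≠ [] := by
      intro h0; rw [h0] at harrlen; simp at harrlen; omega
    have hidxA : ∀ i, (hi : i < min m.toNat n) → (l.queue.take m.toNat)[i]'(by omega)
        = some ((((i + pos) % n : Nat) : Int) + 1) := by
      intro i hi
      rw [List.getElem_take]
      simp only [hq]
      exact hidxR i (by omega)
    -- the first element of arr: the value A collects this iteration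
    have hfirst : (PySem.List.pyGetD (l.queue.take m.toNat) 0 none).getD 0 = (pos : Int) + 1 := by
      rw [PySem.List.pyGetD_zero, List.getD_eq_getElem _ _ (by omega), hidxA 0 (by omega)]
      rw [Nat.zero_add, Nat.mod_eq_of_lt hpos]
      rfl
    -- the last element of arr: A's stopping test
    have hlast : (PySem.List.pyGet? (l.queue.take m.toNat) (-1)).getD none
        = some ((((min m.toNat n - 1 + pos) % n : Nat) : Int) + 1) := by
      rw [PySem.List.pyGet?_neg_one, List.getLast?_eq_getElem?,
          List.getElem?_eq_getElem (by omega)]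
      simp only [Option.getD_some, harrlen]
      exact hidxA _ (by omega)
    -- A's stopping test coincides with B's
    have hBlast : min m (n : Int) - 1 = ((min m.toNat n - 1 : Nat) : Int) := by omega
    have hcond : (PySem.Int.mod ((pos : Int) + PySem.Int.mod (min m (n : Int) - 1) (n : Int)) (n : Int) = 0)
        ↔ ((min m.toNat n - 1 + pos) % n = 0) := by
      rw [PySem.Int.mod_eq_emod_of_pos hn0, PySem.Int.mod_eq_emod_of_pos hn0, hBlast]
      rw [Int.add_emod, Int.emod_emod_of_dvd _ dvd_rfl, ← Int.add_emod]
      rw [show ((pos : Int) + ((min m.toNat n - 1 : Nat) : Int)) = ((pos + (min m.toNat n - 1) : Nat) : Int) from by push_cast; ring]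
      rw [← Int.natCast_mod, Nat.add_comm pos]
      exact_mod_cast Iff.rfl
    -- B's next position is A's queue rotation
    have hpos' : PySem.Int.mod ((pos : Int) + PySem.Int.mod (m - 1) (n : Int)) (n : Int)
        = (((pos + (m - 1).toNat) % n : Nat) : Int) := by
      rw [PySem.Int.mod_eq_emod_of_pos hn0, PySem.Int.mod_eq_emod_of_pos hn0]
      rw [Int.add_emod, Int.emod_emod_of_dvd _ dvd_rfl, ← Int.add_emod]
      rw [show ((pos : Int) + (m - 1)) = ((pos + (m - 1).toNat : Nat) : Int) from by push_cast [Int.toNat_of_nonneg (by omega : (0:Int) ≤ m - 1)]; ring]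
      rw [← Int.natCast_mod]
    -- unfold one iteration on both sides
    simp only [pvWhile, pvAltGo]
    rw [if_neg (by simp)]
    rw [harr, hlast, hpos']
    by_cases hstop : (min m.toNat n - 1 + pos) % n = 0
    · rw [hstop, if_pos (by norm_num), if_pos (hcond.mpr hstop)]
      simp [hfirst]
    · rw [if_neg (by intro hc; rw [Option.some_inj] at hc; exact hstop (by omega))]
      rw [if_neg (fun hc => hstop (hcond.mp hc))]
      have hq' : (pvLNshift l (m - 1)).queue = (pvQueue0 n).rotate ((pos + (m - 1).toNat) % n) := by
        rw [pvShift_queue l _ hqne, hq, List.rotate_rotate]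
        have h := List.rotate_mod (pvQueue0 n) (pos + (m - 1).toNat)
        rw [pvQueue0_length] at h
        exact h.symm
      rw [ih ((pos + (m - 1).toNat) % n) (Nat.mod_lt _ (by omega)) (pvLNshift l (m - 1)) hq'
          (acc ++ [l.queue.take m.toNat])]
      simp [hfirst]

-- ===== VERDICT (by name: the statement is the Claim_ definition above) =====
theorem way_array_spec : Claim_equal_way_array := by
  intro n m _ hpre
  obtain ⟨hn, hm, -⟩ := hpre
  unfold Spec_way_array way_array way_array_alt
  obtain ⟨N, rfl⟩ := Int.eq_ofNat_of_zero_le (by omega : (0 : Int) ≤ n)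
  have hN : 1 ≤ N := by exact_mod_cast hn
  dsimp only
  rw [pvInit_eq N hN]
  have h0 : PySem.List.pyGetD (pvQueue0 N) 0 none = some 1 := by
    have : (0 : Nat) < (pvQueue0 N).length := by rw [pvQueue0_length]; omega
    simpa [pvQueue0_getElem N 0 this] using
      (PySem.List.pyGetD_eq_getElem (xs := pvQueue0 N) (i := 0) (d := none) (by omega)
        (by exact_mod_cast this))
  rw [h0]
  have := pvLoop_lockstep N hN m hm ((N : Int)).toNat 0 (by omega)
    { max_n := (N : Int), queue := pvQueue0 N, head := 0, tail := (N : Int) - 1, size := (N : Int) }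
    (by simp [List.rotate_zero]) []
  simpa using this
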